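-- pv_equiv track=rewrite | github.com/marczepeda/edms | edms/bio/ngs.py | group_boundaries
-- ===== SOURCE A (Python) =====
-- def group_boundaries(nums: list[int]) -> list[tuple[int, int]]:
--     '''
--     group_boundaries(nums): Group a list of integers into segments where each segment contains consecutive numbers.
--
--     Parameters:
--     nums (list[int]): A list of integers to be grouped.
--     '''
--     if not nums: # Check if the list is empty
--         return []
--
--     nums = sorted(set(nums))  # Remove duplicates and sort the list
--     groups = [] # Initialize an empty list to hold the groups
--     start = nums[0]
--
--     for i in range(1, len(nums)): # Iterate through the list starting from the second element
--         if nums[i] - nums[i - 1] > 1: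
--             groups.append((start, nums[i - 1]))
--             start = nums[i]
--
--     groups.append((start, nums[-1]))  # Close the final segment
--     return groups
-- ===== SOURCE B (Python) =====
-- def group_boundaries(nums: list[int]) -> list[tuple[int, int]]:
--     '''Set-membership boundary detection: a value starts a run iff v-1 is absent
--     from the set, ends one iff v+1 is absent; zip the sorted starts with the
--     sorted ends. No adjacent-difference scan, no run accumulator.'''
--     s = set(nums)
--     starts = sorted(v for v in s if v - 1 not in s)
--     ends = sorted(v for v in s if v + 1 not in s)
--     return list(zip(starts, ends))
-- ===== Notes on version B (the rewrite author's own statement) =====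
-- stated objective: alternative
-- what changed: A scans the sorted distinct values comparing adjacent differences with a running 'start' accumulator; B instead detects run boundaries by set membership (v is a start iff v-1 is not in the set, an end iff v+1 is not) and zips the sorted starts with the sorted ends.
import Mathlib
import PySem

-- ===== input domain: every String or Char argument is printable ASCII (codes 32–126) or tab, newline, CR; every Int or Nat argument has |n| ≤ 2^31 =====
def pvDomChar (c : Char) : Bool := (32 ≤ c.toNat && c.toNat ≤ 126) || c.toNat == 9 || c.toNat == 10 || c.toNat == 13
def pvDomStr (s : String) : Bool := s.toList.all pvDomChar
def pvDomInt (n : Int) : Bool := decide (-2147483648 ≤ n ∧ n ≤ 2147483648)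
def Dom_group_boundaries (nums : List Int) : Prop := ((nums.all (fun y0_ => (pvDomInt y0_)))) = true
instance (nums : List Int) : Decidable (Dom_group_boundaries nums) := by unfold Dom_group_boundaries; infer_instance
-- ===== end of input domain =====

-- B replaces A's adjacent-difference scan with a 'start' accumulator by set-membership boundary
-- detection: v starts a run iff v-1 is not in the set, ends one iff v+1 is not; zip the sorted
-- starts with the sorted ends (alternative algorithm, same cost).

-- ===== PORT A =====
-- loop body of A's 'for i in range(1, len(nums))' (state = (groups, start));
-- pyGetD with default 0 is exact here: every index this loop uses is in range.
def gbStepA (xs : List Int) (acc : List (Int × Int) × Int) (i : Int) : List (Int × Int) × Int :=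
  if PySem.List.pyGetD xs i 0 - PySem.List.pyGetD xs (i - 1) 0 > 1 then
    (acc.1 ++ [(acc.2, PySem.List.pyGetD xs (i - 1) 0)], PySem.List.pyGetD xs i 0)
  else acc

def group_boundaries (nums : List Int) : List (Int × Int) :=
  if nums = [] then []
  else
    let xs := PySem.List.sorted (PySem.Set.ofList nums) (fun x => x) false
    let r := (PySem.List.pyRange 1 xs.length 1).foldl (gbStepA xs) ([], PySem.List.pyGetD xs 0 0)
    r.1 ++ [(r.2, PySem.List.pyGetD xs (-1) 0)]

-- ===== PORT B =====
-- 'sorted(v for v in s if v - 1 not in s)' / '... v + 1 not in s'; zip is List.zip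
def group_boundaries_alt (nums : List Int) : List (Int × Int) :=
  let s := PySem.Set.ofList nums
  let starts := PySem.List.sorted (s.filter (fun v => !(PySem.Set.contains s (v - 1)))) (fun x => x) false
  let ends := PySem.List.sorted (s.filter (fun v => !(PySem.Set.contains s (v + 1)))) (fun x => x) false
  starts.zip ends

-- ===== PRECONDITION & SPEC =====
def Spec_group_boundaries (nums : List Int) (out : List (Int × Int)) : Prop := out = group_boundaries_alt nums
instance (nums : List Int) (out : List (Int × Int)) : Decidable (Spec_group_boundaries nums out) := by unfold Spec_group_boundaries; infer_instance

-- ===== CLAIM (what is proved, stated in full; the proofs are below) =====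
def Claim_equal_group_boundaries : Prop := ∀ (nums : List Int), Dom_group_boundaries nums → Spec_group_boundaries nums (group_boundaries nums)

-- ===== LEMMAS AND PROOFS =====

-- proof-only canonical fold: extend the last segment or open a new one
def gbStepB (out : List (Int × Int)) (v : Int) : List (Int × Int) :=
  match out.getLast? with
  | some (a, b) => if v = b + 1 then out.dropLast ++ [(a, v)] else out ++ [(v, v)]
  | none => [(v, v)]

theorem gb_getD_append_left (ys : List Int) (v : Int) (i : Int) (h0 : 0 ≤ i) (h1 : i < ys.length) :
    PySem.List.pyGetD (ys ++ [v]) i 0 = PySem.List.pyGetD ys i 0 := by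
  rw [PySem.List.pyGetD_eq_getElem _ _ h0 (by simp; omega),
      PySem.List.pyGetD_eq_getElem _ _ h0 h1]
  exact List.getElem_append_left (by omega)

-- A's fold equals the canonical gbStepB fold, on any strictly increasing nonempty list
theorem gb_main (xs : List Int) (hx : xs.Pairwise (· < ·)) (hne : xs ≠ []) :
    xs.foldl gbStepB [] =
      (let r := (PySem.List.pyRange 1 xs.length 1).foldl (gbStepA xs) ([], PySem.List.pyGetD xs 0 0)
       r.1 ++ [(r.2, PySem.List.pyGetD xs (-1) 0)]) := by
  induction xs using List.reverseRecOn with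
  | nil => exact absurd rfl hne
  | append_singleton ys v ih =>
    rcases eq_or_ne ys [] with h0 | h0
    · subst h0
      simp [gbStepB, PySem.List.pyGetD, PySem.List.pyGet?, PySem.List.pyIdx?,
            PySem.List.pyRange]
    · have hys : ys.Pairwise (· < ·) := (List.pairwise_append.mp hx).1
      have hLv : ys.getLast h0 < v :=
        (List.pairwise_append.mp hx).2.2 _ (List.getLast_mem h0) v (by simp)
      have hpos : 0 < ys.length := List.length_pos_of_ne_nil h0
      have hlen : ((ys ++ [v]).length : Int) = (ys.length : Int) + 1 := by simp
      have hvget : PySem.List.pyGetD (ys ++ [v]) (ys.length : Int) 0 = v := by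
        rw [PySem.List.pyGetD_eq_getElem _ _ (by positivity) (by simp)]
        exact List.getElem_concat_length (by simp) _
      have hLget : PySem.List.pyGetD (ys ++ [v]) ((ys.length : Int) - 1) 0 = ys.getLast h0 := by
        rw [gb_getD_append_left ys v _ (by omega) (by omega),
            PySem.List.pyGetD_eq_getElem _ _ (by omega) (by omega),
            List.getLast_eq_getElem]
        congr 1
        omega
      have hL : PySem.List.pyGetD ys (-1) 0 = ys.getLast h0 := PySem.List.pyGetD_neg_one ys 0 h0
      rw [List.foldl_append, ih hys h0]
      simp only [hlen]
      rw [PySem.List.pyRange_one_succ_right (by exact_mod_cast hpos), List.foldl_append,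
          PySem.List.foldl_congr_mem (PySem.List.pyRange 1 (ys.length : Int))
            (gbStepA (ys ++ [v])) (gbStepA ys) _
            (by
              intro acc i hi
              obtain ⟨hi1, hi2⟩ := PySem.List.mem_pyRange_one.mp hi
              unfold gbStepA
              rw [gb_getD_append_left ys v i (by omega) (by omega),
                  gb_getD_append_left ys v (i - 1) (by omega) (by omega)]),
          gb_getD_append_left ys v 0 (by norm_num) (by exact_mod_cast hpos)]
      simp only [List.foldl_cons, List.foldl_nil]
      generalize List.foldl (gbStepA ys) ([], PySem.List.pyGetD ys 0 0)
        (PySem.List.pyRange 1 (ys.length : Int)) = r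
      obtain ⟨g, s⟩ := r
      unfold gbStepA gbStepB
      rw [hvget, hLget, hL, PySem.List.pyGetD_neg_one_append_singleton]
      simp only [List.getLast?_concat, List.dropLast_concat]
      by_cases hc : v - ys.getLast h0 > 1
      · have hne' : ¬ v = ys.getLast h0 + 1 := by omega
        simp [hc, hne']
      · have he : v = ys.getLast h0 + 1 := by omega
        simp [he]

-- boundary predicates relative to a list
def gbPS (l : List Int) (v : Int) : Bool := !(l.contains (v - 1))
def gbPE (l : List Int) (v : Int) : Bool := !(l.contains (v + 1))

theorem gb_le_getLast (ys : List Int) (h : ys.Pairwise (· < ·)) (h0 : ys ≠ []) (u : Int)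
    (hu : u ∈ ys) : u ≤ ys.getLast h0 := by
  rcases (List.mem_append.mp ((List.dropLast_append_getLast h0) ▸ hu)) with h1 | h1
  · have := (List.pairwise_append.mp ((List.dropLast_append_getLast h0) ▸ h)).2.2 u h1
      (ys.getLast h0) (by simp)
    omega
  · simp at h1; omega

theorem gb_zip_concat (S E : List Int) (h : S.length = E.length) (a b : Int) :
    (S ++ [a]).zip (E ++ [b]) = S.zip E ++ [(a, b)] := by
  induction S generalizing E with
  | nil => cases E with
    | nil => rfl
    | cons _ _ => simp at h
  | cons x S ih => cases E with
    | nil => simp at h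
    | cons y E => simp [ih E (by simpa using h)]

-- the canonical gbStepB fold equals zip-of-boundaries, on any strictly increasing list
theorem gb_zip (xs : List Int) (hx : xs.Pairwise (· < ·)) :
    (xs.filter (gbPS xs)).length = (xs.filter (gbPE xs)).length ∧
    xs.foldl gbStepB [] = (xs.filter (gbPS xs)).zip (xs.filter (gbPE xs)) := by
  induction xs using List.reverseRecOn with
  | nil => simp
  | append_singleton ys v ih =>
    rcases eq_or_ne ys [] with h0 | h0
    · subst h0
      simp [gbStepB, gbPS, gbPE]
    · have hys : ys.Pairwise (· < ·) := (List.pairwise_append.mp hx).1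
      have hall : ∀ u ∈ ys, u < v := fun u hu =>
        (List.pairwise_append.mp hx).2.2 u hu v (by simp)
      have hLv : ys.getLast h0 < v := hall _ (List.getLast_mem h0)
      obtain ⟨ihl, ihf⟩ := ih hys
      have hdl : ys.dropLast ++ [ys.getLast h0] = ys := List.dropLast_append_getLast h0
      have hdrop_lt : ∀ u ∈ ys.dropLast, u < ys.getLast h0 := by
        intro u hu
        exact (List.pairwise_append.mp (hdl ▸ hys)).2.2 u hu _ (by simp)
      have hnotE : ys.getLast h0 + 1 ∉ ys := by
        intro hmem; have := gb_le_getLast ys hys h0 _ hmem; omega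
      have hsplit : ∀ p : Int → Bool, ys.filter p =
          ys.dropLast.filter p ++ List.filter p [ys.getLast h0] := by
        intro p
        conv_lhs => rw [← hdl]
        rw [List.filter_append]
      -- the starts filter over the extended list
      have hS : (ys ++ [v]).filter (gbPS (ys ++ [v])) =
          ys.filter (gbPS ys) ++ (if v = ys.getLast h0 + 1 then [] else [v]) := by
        rw [List.filter_append, List.filter_congr (l := ys)
          (q := gbPS ys) (by
            intro u hu
            have h1 : u - 1 ≠ v := by have := hall u hu; omega
            simp [gbPS, h1])]
        congr 1
        by_cases hv : v = ys.getLast h0 + 1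
        · have hm : v - 1 ∈ ys ++ [v] := by
            rw [hv]; simp
          rw [if_pos hv, List.filter_cons_of_neg (by simp [gbPS, hm]), List.filter_nil]
        · have hm : v - 1 ∉ ys ++ [v] := by
            intro hmem
            rcases List.mem_append.mp hmem with h2 | h2
            · have := gb_le_getLast ys hys h0 _ h2; omega
            · simp at h2
          rw [if_neg hv, List.filter_cons_of_pos (by simp [gbPS, hm]), List.filter_nil]
      -- the ends filter over the extended list
      have hvE : v + 1 ∉ ys ++ [v] := by
        intro hmem
        rcases List.mem_append.mp hmem with h2 | h2
        · have := hall _ h2; omega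
        · simp at h2
      have hdropEq : ys.dropLast.filter (gbPE (ys ++ [v])) = ys.dropLast.filter (gbPE ys) := by
        apply List.filter_congr
        intro u hu
        have h1 : u + 1 ≠ v := by have := hdrop_lt u hu; omega
        simp [gbPE, h1]
      have hlastE : ys.filter (gbPE ys) = ys.dropLast.filter (gbPE ys) ++ [ys.getLast h0] := by
        rw [hsplit (gbPE ys), List.filter_cons_of_pos (by simp [gbPE, hnotE]), List.filter_nil]
      have hE : (ys ++ [v]).filter (gbPE (ys ++ [v])) =
          (if v = ys.getLast h0 + 1 then ys.dropLast.filter (gbPE ys)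
           else ys.filter (gbPE ys)) ++ [v] := by
        rw [List.filter_append, List.filter_cons_of_pos (by simp [gbPE, hvE]), List.filter_nil,
            hsplit (gbPE (ys ++ [v])), hdropEq]
        congr 1
        by_cases hv : v = ys.getLast h0 + 1
        · have hm : ys.getLast h0 + 1 ∈ ys ++ [v] := by simp [hv]
          rw [if_pos hv, List.filter_cons_of_neg (by simp [gbPE, hm]), List.filter_nil,
              List.append_nil]
        · have hm : ys.getLast h0 + 1 ∉ ys ++ [v] := by
            intro hmem
            rcases List.mem_append.mp hmem with h2 | h2
            · exact hnotE h2
            · have : ys.getLast h0 + 1 = v := by simpa using h2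
              omega
          rw [if_neg hv, List.filter_cons_of_pos (by simp [gbPE, hm]), List.filter_nil, hlastE]
      -- decompose the starts filter at its last element
      have hSne : ys.filter (gbPS ys) ≠ [] := by
        intro hnil
        rw [hnil, hlastE] at ihl
        simp at ihl
      rcases List.eq_nil_or_concat (ys.filter (gbPS ys)) with hbad | ⟨S', a, hSeq⟩
      · exact absurd hbad hSne
      rw [List.concat_eq_append] at hSeq
      have hlen' : S'.length = (ys.dropLast.filter (gbPE ys)).length := by
        rw [hSeq, hlastE] at ihl
        simp at ihl
        omega
      refine ⟨?_, ?_⟩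
      · rw [hS, hE, hSeq, hlastE]
        by_cases hv : v = ys.getLast h0 + 1 <;> simp [hv, hlen']
      · rw [List.foldl_append, List.foldl_cons, List.foldl_nil, ihf, hS, hE, hSeq, hlastE,
            gb_zip_concat _ _ hlen']
        unfold gbStepB
        rw [List.getLast?_concat]
        by_cases hv : v = ys.getLast h0 + 1
        · simp only [if_pos hv, List.append_nil]
          rw [gb_zip_concat _ _ hlen']
          simp [hv]
        · simp only [if_neg hv]
          rw [gb_zip_concat _ _ (by simp [hlen']), gb_zip_concat _ _ hlen']

-- sorting the filtered set equals filtering the sorted set (and the membership tests agree)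
theorem gb_sorted_filter (nums : List Int) (p : List Int → Int → Bool)
    (hp : ∀ l l' v, (∀ u : Int, u ∈ l ↔ u ∈ l') → p l v = p l' v) :
    PySem.List.sorted ((PySem.Set.ofList nums).filter (p (PySem.Set.ofList nums)))
      (fun x => x) false =
    (PySem.List.sorted (PySem.Set.ofList nums) (fun x => x) false).filter
      (p (PySem.List.sorted (PySem.Set.ofList nums) (fun x => x) false)) := by
  set s := PySem.Set.ofList nums with hs
  set xs := PySem.List.sorted s (fun x => x) false with hxs
  have hperm : xs.Perm s := PySem.List.sorted_perm s (fun x => x) false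
  have hmemeq : ∀ u : Int, u ∈ xs ↔ u ∈ s := fun u => hperm.mem_iff
  have hpeq : p xs = p s := funext (fun v => hp xs s v hmemeq)
  apply PySem.List.sorted_eq_of_perm_of_pairwise_lt
  · rw [hpeq]
    exact hperm.filter _
  · exact (PySem.List.sorted_ofList_pairwise_lt nums).filter _

-- ===== VERDICT (by name: the statement is the Claim_ definition above) =====
theorem group_boundaries_spec : Claim_equal_group_boundaries := by
  intro nums _
  unfold Spec_group_boundaries group_boundaries group_boundaries_alt
  by_cases h : nums = []
  · subst h
    simp [PySem.Set.ofList, PySem.List.sorted]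
  · rw [if_neg h]
    have hcontains : ∀ (l : List Int) (u : Int), PySem.Set.contains l u = l.contains u := by
      intro l u; rfl
    have hpw := PySem.List.sorted_ofList_pairwise_lt nums
    have hne : PySem.List.sorted (PySem.Set.ofList nums) (fun x => x) false ≠ [] := by
      rw [Ne, PySem.List.sorted_eq_nil_iff]
      intro hz
      obtain ⟨x, hx⟩ := List.exists_mem_of_ne_nil nums h
      exact absurd (hz ▸ (PySem.Set.mem_ofList nums x).mpr hx) (List.not_mem_nil)
    dsimp only
    rw [gb_sorted_filter nums (fun l v => !(PySem.Set.contains l (v - 1)))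
          (by intro l l' v hm; simp [hm]),
        gb_sorted_filter nums (fun l v => !(PySem.Set.contains l (v + 1)))
          (by intro l l' v hm; simp [hm])]
    have hzip := (gb_zip _ hpw).2
    have hmain := gb_main _ hpw hne
    rw [← hmain, hzip]
    rfl
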